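-- pv_equiv track=rewrite | github.com/AntonBrazouski/thinkcspy | 10_Lists/10_31_12.py | count_words_before_sam
-- ===== SOURCE A (Python) =====
-- def count_words_before_sam(alist):
--     word_counter = 0
--     for word in alist:
--         if word == 'sam':
--             word_counter += 1
--             break
--         word_counter += 1
--     return word_counter
-- ===== SOURCE B (Python) =====
-- def count_words_before_sam(alist):
--     # Fold the list back-to-front: a 'sam' resets the running count to 1,
--     # any other word adds one on top of the count for the suffix after it.
--     count = 0
--     for word in reversed(alist):
--         count = 1 if word == 'sam' else count + 1
--     return count
-- ===== Notes on version B (the rewrite author's own statement) =====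
-- stated objective: alternative
-- what changed: Replaced the forward counting loop with an early break by a right-to-left fold over the whole list whose accumulator is reset to 1 at each 'sam' and incremented otherwise; no break or position search is needed.
import Mathlib
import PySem

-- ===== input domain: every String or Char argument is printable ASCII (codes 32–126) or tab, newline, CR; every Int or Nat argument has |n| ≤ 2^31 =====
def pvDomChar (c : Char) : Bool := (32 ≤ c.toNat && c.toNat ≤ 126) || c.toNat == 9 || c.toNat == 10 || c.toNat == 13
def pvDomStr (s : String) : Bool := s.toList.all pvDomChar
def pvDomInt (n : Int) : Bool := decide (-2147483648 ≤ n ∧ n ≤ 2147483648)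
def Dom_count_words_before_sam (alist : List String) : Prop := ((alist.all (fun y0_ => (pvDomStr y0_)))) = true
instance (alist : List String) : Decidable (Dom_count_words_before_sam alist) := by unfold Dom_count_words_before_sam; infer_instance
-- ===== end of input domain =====

-- B replaces A's forward loop with an early break by a right-to-left fold that resets its accumulator at 'sam' (alternative decomposition).


-- ===== PORT A =====
def countLoop (alist : List String) (word_counter : Int) : Int :=
  match alist with
  | [] => word_counter
  | word :: rest =>
    if word == "sam" then word_counter + 1
    else countLoop rest (word_counter + 1)

def count_words_before_sam (alist : List String) : Int :=
  countLoop alist 0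

-- ===== PORT B =====
def count_words_before_sam_alt (alist : List String) : Int :=
  alist.reverse.foldl (fun count word => if word == "sam" then 1 else count + 1) 0

-- ===== PRECONDITION & SPEC =====
def Spec_count_words_before_sam (alist : List String) (out : Int) : Prop := out = count_words_before_sam_alt alist
instance (alist : List String) (out : Int) : Decidable (Spec_count_words_before_sam alist out) := by unfold Spec_count_words_before_sam; infer_instance

-- ===== CLAIM (what is proved, stated in full; the proofs are below) =====
def Claim_equal_count_words_before_sam : Prop := ∀ (alist : List String), Dom_count_words_before_sam alist → Spec_count_words_before_sam alist (count_words_before_sam alist)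

-- ===== LEMMAS AND PROOFS =====
lemma countLoop_add (alist : List String) (c : Int) :
    countLoop alist c = c + countLoop alist 0 := by
  induction alist generalizing c with
  | nil => simp [countLoop]
  | cons w rest ih =>
    simp only [countLoop]
    split
    · ring
    · rw [ih (c+1), ih (0+1)]; ring

lemma main (alist : List String) :
    count_words_before_sam alist = count_words_before_sam_alt alist := by
  unfold count_words_before_sam count_words_before_sam_alt
  rw [List.foldl_reverse]
  induction alist with
  | nil => simp [countLoop]
  | cons w rest ih =>
    simp only [countLoop, List.foldr_cons]
    by_cases h : (w == "sam") = true
    · simp [h]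
    · simp only [h, Bool.false_eq_true, if_false]
      rw [countLoop_add rest (0+1), ih]
      ring

-- ===== VERDICT (by name: the statement is the Claim_ definition above) =====
theorem count_words_before_sam_spec : Claim_equal_count_words_before_sam := by
  intro alist _
  exact main alist
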